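-- pv_equiv track=rewrite | github.com/minhnguyenquang1709/pp2024 | pw4/input.py | checkDOB
-- ===== SOURCE A (Python) =====
-- def checkDOB(input_date):
--     # Check if the input has the correct format (dd-mm-yyyy)
--     if len(input_date) == 10 and input_date[2] == input_date[5] == '-':
--         for i in range(len(input_date)):
--             if i == 2 or i==5:
--                 continue
--             if input_date[i].isnumeric():
--                 continue
--             else:
--                 return False
--         day, month, year = map(int, input_date.split('-'))
--
--         # Check if day, month, and year values are within valid ranges
--         if 1 <= day <= 31 and 1 <= month <= 12 and 1900 <= year <= 2024:
--             return True
--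
--     # If any condition fails, return False
--     return False
-- ===== SOURCE B (Python) =====
-- def checkDOB(input_date):
--     # Split into fields first, then validate each field.
--     parts = input_date.split('-')
--     if len(parts) != 3:
--         return False
--     d, m, y = parts
--     if len(d) != 2 or len(m) != 2 or len(y) != 4:
--         return False
--     for part in parts:
--         for ch in part:
--             if not ch.isnumeric():
--                 return False
--     day, month, year = map(int, parts)
--     return 1 <= day <= 31 and 1 <= month <= 12 and 1900 <= year <= 2024
-- ===== Notes on version B (the rewrite author's own statement) =====
-- stated objective: alternative
-- what changed: B splits the string on '-' first and validates the three resulting fields (part count, field lengths 2/2/4, per-field isnumeric, then int ranges), instead of A's positional scan over all 10 indices with hard-coded dash positions.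
import Mathlib
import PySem

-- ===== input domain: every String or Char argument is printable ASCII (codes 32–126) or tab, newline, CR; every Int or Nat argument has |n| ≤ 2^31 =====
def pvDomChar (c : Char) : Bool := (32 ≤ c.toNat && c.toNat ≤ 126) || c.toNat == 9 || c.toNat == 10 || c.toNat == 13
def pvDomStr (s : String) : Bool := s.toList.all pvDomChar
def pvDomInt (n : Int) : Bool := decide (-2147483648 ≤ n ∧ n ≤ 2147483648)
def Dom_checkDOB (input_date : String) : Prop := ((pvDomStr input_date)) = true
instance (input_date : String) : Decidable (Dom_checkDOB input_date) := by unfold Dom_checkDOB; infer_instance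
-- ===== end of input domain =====

-- B splits the input on '-' and validates the three fields, instead of A's positional
-- scan of all 10 characters with hard-coded dash positions; same cost, different decomposition.


-- ===== PORT A =====
-- A-side helper: A's body on the code-point list.
-- `.isnumeric()` is ported as `PySem.Chars.isdigit` (exact on the printable-ASCII domain,
-- where isnumeric and isdigit coincide: the decimal digits '0'-'9').
def checkDOBCore (cs : List Char) : Bool :=
  -- if len(input_date) == 10 and input_date[2] == input_date[5] == '-':
  if cs.length == 10 &&
     (PySem.List.pyGet? cs 2 == PySem.List.pyGet? cs 5) &&
     (PySem.List.pyGet? cs 5 == some '-') then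
    -- for i in range(len(input_date)): … return False on a non-numeric non-dash position
    if (PySem.List.pyRange 0 (cs.length : Int) 1).all (fun i =>
        if i == 2 || i == 5 then true
        else match PySem.List.pyGet? cs i with
             | some c => PySem.Chars.isdigit c
             | none => false) then
      -- day, month, year = map(int, input_date.split('-'))   (split('-') cannot raise: sep ≠ '')
      match PySem.Chars.splitOn cs ['-'] with
      | [d, m, y] =>
        match PySem.Int.ofChars? d, PySem.Int.ofChars? m, PySem.Int.ofChars? y with
        | some day, some month, some year =>
          -- if 1 <= day <= 31 and 1 <= month <= 12 and 1900 <= year <= 2024: return True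
          decide (1 ≤ day ∧ day ≤ 31 ∧ 1 ≤ month ∧ month ≤ 12 ∧ 1900 ≤ year ∧ year ≤ 2024)
        | _, _, _ => false   -- unreachable here: the fields are all-digit, int() cannot raise
      | _ => false           -- unreachable here: exactly two dashes, split has exactly 3 parts
    else false
  else false

def checkDOB (input_date : String) : Bool := checkDOBCore input_date.toList

-- ===== PORT B =====
-- B-side helper: B's body on the code-point list (same isnumeric-as-isdigit note as above).
def checkDOBAltCore (cs : List Char) : Bool :=
  -- parts = input_date.split('-');  if len(parts) != 3: return False;  d, m, y = parts
  match PySem.Chars.splitOn cs ['-'] with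
  | [d, m, y] =>
    -- if len(d) != 2 or len(m) != 2 or len(y) != 4: return False
    if d.length != 2 || m.length != 2 || y.length != 4 then false
    else
      -- for part in parts: for ch in part: if not ch.isnumeric(): return False
      if [d, m, y].all (fun p => p.all PySem.Chars.isdigit) then
        -- day, month, year = map(int, parts); return 1<=day<=31 and 1<=month<=12 and 1900<=year<=2024
        match PySem.Int.ofChars? d, PySem.Int.ofChars? m, PySem.Int.ofChars? y with
        | some day, some month, some year =>
          decide (1 ≤ day ∧ day ≤ 31 ∧ 1 ≤ month ∧ month ≤ 12 ∧ 1900 ≤ year ∧ year ≤ 2024)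
        | _, _, _ => false   -- unreachable: all-digit fields
      else false
  | _ => false

def checkDOB_alt (input_date : String) : Bool := checkDOBAltCore input_date.toList

-- ===== PRECONDITION & SPEC =====
def Spec_checkDOB (input_date : String) (out : Bool) : Prop := out = checkDOB_alt input_date
instance (input_date : String) (out : Bool) : Decidable (Spec_checkDOB input_date out) := by unfold Spec_checkDOB; infer_instance

-- ===== CLAIM (what is proved, stated in full; the proofs are below) =====
def Claim_equal_checkDOB : Prop := ∀ (input_date : String), Dom_checkDOB input_date → Spec_checkDOB input_date (checkDOB input_date)

-- ===== LEMMAS AND PROOFS =====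

/-- Reference recursion for splitting on '-' (proof helper only). -/
def splitDash : List Char → List (List Char)
  | [] => [[]]
  | c :: rest =>
    if c = '-' then [] :: splitDash rest
    else
      match splitDash rest with
      | [] => [[c]]
      | p :: ps => (c :: p) :: ps

theorem splitDash_ne_nil (cs : List Char) : splitDash cs ≠ [] := by
  cases cs with
  | nil => simp [splitDash]
  | cons c rest =>
    simp only [splitDash]
    split_ifs
    · simp
    · cases h : splitDash rest <;> simp

theorem splitDash_cons_exists (cs : List Char) : ∃ p ps, splitDash cs = p :: ps := by
  cases hx : splitDash cs with
  | nil => exact absurd hx (splitDash_ne_nil cs)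
  | cons a b => exact ⟨a, b, rfl⟩

theorem splitDash_dash (rest : List Char) : splitDash ('-' :: rest) = [] :: splitDash rest := by
  simp [splitDash]

theorem splitDash_nondash (c : Char) (rest p' : List Char) (ps' : List (List Char))
    (hc : c ≠ '-') (hrest : splitDash rest = p' :: ps') :
    splitDash (c :: rest) = (c :: p') :: ps' := by
  simp [splitDash, hc, hrest]

theorem go_eq (l : List Char) : ∀ (fuel : Nat) (cur : List Char) (acc : List (List Char))
    (p : List Char) (ps : List (List Char)), l.length < fuel → splitDash l = p :: ps →
    PySem.Chars.splitOn.go ['-'] fuel l cur acc = acc.reverse ++ (cur.reverse ++ p) :: ps := by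
  induction l with
  | nil =>
    intro fuel cur acc p ps hf h
    cases fuel with
    | zero => omega
    | succ f =>
      simp only [splitDash] at h
      injection h with h1 h2
      subst h1; subst h2
      simp [PySem.Chars.splitOn.go]
  | cons c rest ih =>
    intro fuel cur acc p ps hf h
    cases fuel with
    | zero => exact absurd hf (Nat.not_lt_zero _)
    | succ f =>
      obtain ⟨p', ps', hrest⟩ := splitDash_cons_exists rest
      by_cases hc : c = '-'
      · subst hc
        rw [splitDash_dash, hrest] at h
        injection h with h1 h2
        subst h1; subst h2
        have hstep : PySem.Chars.splitOn.go ['-'] (f + 1) ('-' :: rest) cur acc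
            = PySem.Chars.splitOn.go ['-'] f rest [] (cur.reverse :: acc) := by
          simp [PySem.Chars.splitOn.go, List.isPrefixOf]
        rw [hstep, ih f [] (cur.reverse :: acc) p' ps' (by simp at hf; omega) hrest]
        simp
      · rw [splitDash_nondash c rest p' ps' hc hrest] at h
        injection h with h1 h2
        subst h1; subst h2
        have hpref : (['-'].isPrefixOf (c :: rest)) = false := by
          simp only [List.isPrefixOf, Bool.and_eq_false_iff, beq_eq_false_iff_ne, ne_eq]
          left
          exact fun h' => hc h'.symm
        have hstep : PySem.Chars.splitOn.go ['-'] (f + 1) (c :: rest) cur acc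
            = PySem.Chars.splitOn.go ['-'] f rest (c :: cur) acc := by
          simp [PySem.Chars.splitOn.go, hpref]
        rw [hstep, ih f (c :: cur) acc p' ps' (by simp at hf; omega) hrest]
        simp

theorem splitOn_eq_splitDash (cs : List Char) :
    PySem.Chars.splitOn cs ['-'] = splitDash cs := by
  obtain ⟨p, ps, h⟩ := splitDash_cons_exists cs
  rw [h]
  show PySem.Chars.splitOn.go ['-'] (cs.length + 1) cs [] [] = p :: ps
  rw [go_eq cs (cs.length + 1) [] [] p ps (by omega) h]
  simp

theorem notMem_cons_of (c : Char) (p : List Char) (hc : c ≠ '-') (hp : '-' ∉ p) :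
    '-' ∉ c :: p := by
  intro hmem
  rcases List.mem_cons.1 hmem with h' | h'
  · exact hc h'.symm
  · exact hp h'

theorem bk1 (cs : List Char) : ∀ (d : List Char), splitDash cs = [d] → cs = d ∧ '-' ∉ d := by
  induction cs with
  | nil =>
    intro d h
    simp only [splitDash] at h
    injection h with h1 _
    subst h1
    exact ⟨rfl, by simp⟩
  | cons c rest ih =>
    intro d h
    obtain ⟨p', ps', hrest⟩ := splitDash_cons_exists rest
    by_cases hc : c = '-'
    · subst hc
      rw [splitDash_dash, hrest] at h
      injection h with _ h2
      exact absurd h2.symm (by simp)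
    · rw [splitDash_nondash c rest p' ps' hc hrest] at h
      injection h with h1 h2
      obtain ⟨hr, hp⟩ := ih p' (by rw [hrest, h2])
      refine ⟨?_, ?_⟩
      · rw [hr, ← h1]
      · rw [← h1]; exact notMem_cons_of c p' hc hp

theorem bk2 (cs : List Char) : ∀ (d m : List Char), splitDash cs = [d, m] →
    cs = d ++ '-' :: m ∧ '-' ∉ d ∧ '-' ∉ m := by
  induction cs with
  | nil => intro d m h; simp [splitDash] at h
  | cons c rest ih =>
    intro d m h
    obtain ⟨p', ps', hrest⟩ := splitDash_cons_exists rest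
    by_cases hc : c = '-'
    · subst hc
      rw [splitDash_dash, hrest] at h
      injection h with h1 h2
      subst h1
      obtain ⟨hr, hp⟩ := bk1 rest m (hrest.trans h2)
      subst hr
      exact ⟨rfl, by simp, hp⟩
    · rw [splitDash_nondash c rest p' ps' hc hrest] at h
      injection h with h1 h2
      obtain ⟨hr, hpd, hpm⟩ := ih p' m (by rw [hrest, h2])
      refine ⟨?_, ?_, hpm⟩
      · rw [hr, ← h1, List.cons_append]
      · rw [← h1]; exact notMem_cons_of c p' hc hpd
  
theorem bk3 (cs : List Char) : ∀ (d m y : List Char), splitDash cs = [d, m, y] →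
    cs = d ++ '-' :: (m ++ '-' :: y) ∧ '-' ∉ d ∧ '-' ∉ m ∧ '-' ∉ y := by
  induction cs with
  | nil => intro d m y h; simp [splitDash] at h
  | cons c rest ih =>
    intro d m y h
    obtain ⟨p', ps', hrest⟩ := splitDash_cons_exists rest
    by_cases hc : c = '-'
    · subst hc
      rw [splitDash_dash, hrest] at h
      injection h with h1 h2
      subst h1
      obtain ⟨hr, hpm, hpy⟩ := bk2 rest m y (hrest.trans h2)
      subst hr
      exact ⟨rfl, by simp, hpm, hpy⟩
    · rw [splitDash_nondash c rest p' ps' hc hrest] at h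
      injection h with h1 h2
      obtain ⟨hr, hpd, hpm, hpy⟩ := ih p' m y (by rw [hrest, h2])
      refine ⟨?_, ?_, hpm, hpy⟩
      · rw [hr, ← h1, List.cons_append]
      · rw [← h1]; exact notMem_cons_of c p' hc hpd

-- A's guard and loop, abbreviated for the proofs
def aGuard (cs : List Char) : Bool :=
  cs.length == 10 &&
  (PySem.List.pyGet? cs 2 == PySem.List.pyGet? cs 5) &&
  (PySem.List.pyGet? cs 5 == some '-')

def aLoop (cs : List Char) : Bool :=
  (PySem.List.pyRange 0 (cs.length : Int) 1).all (fun i =>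
    if i == 2 || i == 5 then true
    else match PySem.List.pyGet? cs i with
         | some c => PySem.Chars.isdigit c
         | none => false)

theorem guard_forward (d m y : List Char)
    (hd2 : d.length = 2) (hm2 : m.length = 2) (hy4 : y.length = 4)
    (hdd : d.all PySem.Chars.isdigit = true) (hmd : m.all PySem.Chars.isdigit = true)
    (hyd : y.all PySem.Chars.isdigit = true) :
    aGuard (d ++ '-' :: (m ++ '-' :: y)) = true ∧ aLoop (d ++ '-' :: (m ++ '-' :: y)) = true := by
  rcases d with _ | ⟨a1, _ | ⟨a2, _ | ⟨a3, dt⟩⟩⟩ <;> simp only [List.length] at hd2 <;> try omega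
  rcases m with _ | ⟨b1, _ | ⟨b2, _ | ⟨b3, mt⟩⟩⟩ <;> simp only [List.length] at hm2 <;> try omega
  rcases y with _ | ⟨c1, _ | ⟨c2, _ | ⟨c3, _ | ⟨c4, _ | ⟨c5, yt⟩⟩⟩⟩⟩ <;>
    simp only [List.length] at hy4 <;> try omega
  simp only [List.all_cons, List.all_nil, Bool.and_eq_true, Bool.and_true] at hdd hmd hyd
  constructor
  · simp [aGuard, PySem.List.pyGet?, PySem.List.pyIdx?]
  · have hr : PySem.List.pyRange 0 (10 : Int) 1 = [0,1,2,3,4,5,6,7,8,9] := by decide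
    have hlen : ((([a1, a2] ++ '-' :: ([b1, b2] ++ '-' :: [c1, c2, c3, c4])).length : Nat) : Int)
        = (10 : Int) := by norm_num
    simp only [aLoop]
    rw [hlen, hr]
    simp [PySem.List.pyGet?, PySem.List.pyIdx?, hdd.1, hdd.2, hmd.1, hmd.2,
          hyd.1, hyd.2.1, hyd.2.2.1, hyd.2.2.2]

theorem guard_backward (d m y : List Char)
    (hG : aGuard (d ++ '-' :: (m ++ '-' :: y)) = true)
    (hL : aLoop (d ++ '-' :: (m ++ '-' :: y)) = true) :
    d.length = 2 ∧ m.length = 2 ∧ y.length = 4 ∧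
    d.all PySem.Chars.isdigit = true ∧ m.all PySem.Chars.isdigit = true ∧
    y.all PySem.Chars.isdigit = true := by
  set cs := d ++ '-' :: (m ++ '-' :: y) with hcs
  have hlen10 : cs.length = 10 := by
    have hG' := hG
    unfold aGuard at hG'
    simp only [Bool.and_eq_true, beq_iff_eq] at hG'
    exact hG'.1.1
  have hsum : d.length + m.length + y.length + 2 = 10 := by
    rw [hcs] at hlen10
    simp only [List.length_append, List.length_cons] at hlen10
    omega
  have key : ∀ (k : Nat) (hk : k < cs.length), k ≠ 2 → k ≠ 5 →
      PySem.Chars.isdigit (cs[k]'hk) = true := by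
    intro k hk hk2 hk5
    unfold aLoop at hL
    rw [List.all_eq_true] at hL
    have hmem : ((k : Nat) : Int) ∈ PySem.List.pyRange 0 (cs.length : Int) 1 := by
      rw [PySem.List.mem_pyRange_one]
      constructor <;> omega
    have hb := hL _ hmem
    have hif : (((k : Nat) : Int) == 2 || ((k : Nat) : Int) == 5) = false := by
      simp only [Bool.or_eq_false_iff, beq_eq_false_iff_ne, ne_eq]
      constructor <;> omega
    rw [hif] at hb
    simp only [Bool.false_eq_true, if_false] at hb
    have hpg : PySem.List.pyGet? cs ((k : Nat) : Int) = some (cs[k]'hk) := by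
      rw [PySem.List.pyGet?_natCast, List.getElem?_eq_getElem hk]
    rw [hpg] at hb
    exact hb
  have hdig_dash : PySem.Chars.isdigit '-' = false := by decide
  have hsep1 : ∀ (h : d.length < cs.length), cs[d.length]'h = '-' := by
    intro h
    simp only [hcs]
    rw [List.getElem_append_right (le_refl d.length)]
    simp
  have hsep2 : ∀ (h : d.length + 1 + m.length < cs.length),
      cs[d.length + 1 + m.length]'h = '-' := by
    intro h
    simp only [hcs]
    rw [List.getElem_append_right (by omega : d.length ≤ d.length + 1 + m.length)]
    have e1 : d.length + 1 + m.length - d.length = m.length + 1 := by omega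
    simp only [e1, List.getElem_cons_succ]
    rw [List.getElem_append_right (le_refl m.length)]
    simp
  have hd1 : d.length = 2 ∨ d.length = 5 := by
    by_contra hcon
    push Not at hcon
    have hlt : d.length < cs.length := by rw [hlen10]; omega
    have hk := key d.length hlt hcon.1 hcon.2
    rw [hsep1 hlt, hdig_dash] at hk
    exact absurd hk (by simp)
  have hd2' : d.length + 1 + m.length = 2 ∨ d.length + 1 + m.length = 5 := by
    by_contra hcon
    push Not at hcon
    have hlt : d.length + 1 + m.length < cs.length := by rw [hlen10]; omega
    have hk := key _ hlt hcon.1 hcon.2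
    rw [hsep2 hlt, hdig_dash] at hk
    exact absurd hk (by simp)
  have hdl : d.length = 2 := by omega
  have hml : m.length = 2 := by omega
  have hyl : y.length = 4 := by omega
  refine ⟨hdl, hml, hyl, ?_, ?_, ?_⟩
  · rw [List.all_eq_true]
    intro x hx
    obtain ⟨i, hi, rfl⟩ := List.mem_iff_getElem.1 hx
    have hlt : i < cs.length := by rw [hlen10]; omega
    have he : cs[i]'hlt = d[i]'hi := by
      simp only [hcs]
      exact List.getElem_append_left hi
    have hk := key i hlt (by omega) (by omega)
    rwa [he] at hk
  · rw [List.all_eq_true]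
    intro x hx
    obtain ⟨i, hi, rfl⟩ := List.mem_iff_getElem.1 hx
    have hlt : d.length + 1 + i < cs.length := by rw [hlen10]; omega
    have he : cs[d.length + 1 + i]'hlt = m[i]'hi := by
      simp only [hcs]
      rw [List.getElem_append_right (by omega : d.length ≤ d.length + 1 + i)]
      have e1 : d.length + 1 + i - d.length = i + 1 := by omega
      simp only [e1, List.getElem_cons_succ]
      exact List.getElem_append_left hi
    have hk := key _ hlt (by omega) (by omega)
    rwa [he] at hk
  · rw [List.all_eq_true]
    intro x hx
    obtain ⟨i, hi, rfl⟩ := List.mem_iff_getElem.1 hx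
    have hlt : d.length + 1 + m.length + 1 + i < cs.length := by rw [hlen10]; omega
    have he : cs[d.length + 1 + m.length + 1 + i]'hlt = y[i]'hi := by
      simp only [hcs]
      rw [List.getElem_append_right (by omega : d.length ≤ d.length + 1 + m.length + 1 + i)]
      have e1 : d.length + 1 + m.length + 1 + i - d.length = m.length + 1 + i + 1 := by omega
      simp only [e1, List.getElem_cons_succ]
      rw [List.getElem_append_right (by omega : m.length ≤ m.length + 1 + i)]
      have e2 : m.length + 1 + i - m.length = i + 1 := by omega
      simp only [e2, List.getElem_cons_succ]
    have hk := key _ hlt (by omega) (by omega)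
    rwa [he] at hk

theorem aCore_eval (cs d m y : List Char) (h : PySem.Chars.splitOn cs ['-'] = [d, m, y]) :
    checkDOBCore cs =
      (if aGuard cs = true then
        if aLoop cs = true then
          (match PySem.Int.ofChars? d, PySem.Int.ofChars? m, PySem.Int.ofChars? y with
           | some day, some month, some year =>
             decide (1 ≤ day ∧ day ≤ 31 ∧ 1 ≤ month ∧ month ≤ 12 ∧ 1900 ≤ year ∧ year ≤ 2024)
           | _, _, _ => false)
        else false
      else false) := by
  unfold checkDOBCore aGuard aLoop
  rw [h]

theorem aCore_not3 (cs : List Char) (ps : List (List Char))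
    (h : PySem.Chars.splitOn cs ['-'] = ps)
    (hshape : ∀ d m y, ps ≠ [d, m, y]) : checkDOBCore cs = false := by
  unfold checkDOBCore
  rw [h]
  rcases ps with _ | ⟨d, _ | ⟨m, _ | ⟨y, _ | ⟨w, ws⟩⟩⟩⟩
  · split_ifs <;> rfl
  · split_ifs <;> rfl
  · split_ifs <;> rfl
  · exact absurd rfl (hshape d m y)
  · split_ifs <;> rfl

theorem altCore_eval (cs d m y : List Char) (h : PySem.Chars.splitOn cs ['-'] = [d, m, y]) :
    checkDOBAltCore cs =
      (if (d.length != 2 || m.length != 2 || y.length != 4) = true then false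
       else if ([d, m, y].all (fun p => p.all PySem.Chars.isdigit)) = true then
         (match PySem.Int.ofChars? d, PySem.Int.ofChars? m, PySem.Int.ofChars? y with
          | some day, some month, some year =>
            decide (1 ≤ day ∧ day ≤ 31 ∧ 1 ≤ month ∧ month ≤ 12 ∧ 1900 ≤ year ∧ year ≤ 2024)
          | _, _, _ => false)
       else false) := by
  unfold checkDOBAltCore
  rw [h]

theorem altCore_not3 (cs : List Char) (ps : List (List Char))
    (h : PySem.Chars.splitOn cs ['-'] = ps)
    (hshape : ∀ d m y, ps ≠ [d, m, y]) : checkDOBAltCore cs = false := by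
  unfold checkDOBAltCore
  rw [h]
  rcases ps with _ | ⟨d, _ | ⟨m, _ | ⟨y, _ | ⟨w, ws⟩⟩⟩⟩
  · rfl
  · rfl
  · rfl
  · exact absurd rfl (hshape d m y)
  · rfl

theorem core_eq (cs : List Char) : checkDOBCore cs = checkDOBAltCore cs := by
  have hsd := splitOn_eq_splitDash cs
  rcases hsplit : splitDash cs with _ | ⟨d, _ | ⟨m, _ | ⟨y, _ | ⟨w, ws⟩⟩⟩⟩
  · exact absurd hsplit (splitDash_ne_nil cs)
  · rw [aCore_not3 cs [d] (by rw [hsd, hsplit]) (by intro _ _ _ h'; simp at h'),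
        altCore_not3 cs [d] (by rw [hsd, hsplit]) (by intro _ _ _ h'; simp at h')]
  · rw [aCore_not3 cs [d, m] (by rw [hsd, hsplit]) (by intro _ _ _ h'; simp at h'),
        altCore_not3 cs [d, m] (by rw [hsd, hsplit]) (by intro _ _ _ h'; simp at h')]
  · -- exactly three parts
    have h3 : PySem.Chars.splitOn cs ['-'] = [d, m, y] := by rw [hsd, hsplit]
    rw [aCore_eval cs d m y h3, altCore_eval cs d m y h3]
    obtain ⟨hcseq, -, -, -⟩ := bk3 cs d m y hsplit
    subst hcseq
    by_cases hB : d.length = 2 ∧ m.length = 2 ∧ y.length = 4 ∧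
        d.all PySem.Chars.isdigit = true ∧ m.all PySem.Chars.isdigit = true ∧
        y.all PySem.Chars.isdigit = true
    · obtain ⟨h1, h2, h3', h4, h5, h6⟩ := hB
      obtain ⟨hG, hL⟩ := guard_forward d m y h1 h2 h3' h4 h5 h6
      rw [if_pos hG, if_pos hL,
          if_neg (by simp [h1, h2, h3'] :
            ¬ ((d.length != 2 || m.length != 2 || y.length != 4) = true)),
          if_pos (by simp [h4, h5, h6] :
            ([d, m, y].all (fun p => p.all PySem.Chars.isdigit)) = true)]
    · have hAfalse : aGuard (d ++ '-' :: (m ++ '-' :: y)) = false ∨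
          aLoop (d ++ '-' :: (m ++ '-' :: y)) = false := by
        cases hG : aGuard (d ++ '-' :: (m ++ '-' :: y)) with
        | false => exact Or.inl rfl
        | true =>
          cases hLv : aLoop (d ++ '-' :: (m ++ '-' :: y)) with
          | false => exact Or.inr rfl
          | true => exact absurd (guard_backward d m y hG hLv) hB
      have hRHS : (if (d.length != 2 || m.length != 2 || y.length != 4) = true then false
          else if ([d, m, y].all (fun p => p.all PySem.Chars.isdigit)) = true then
            (match PySem.Int.ofChars? d, PySem.Int.ofChars? m, PySem.Int.ofChars? y with
             | some day, some month, some year =>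
               decide (1 ≤ day ∧ day ≤ 31 ∧ 1 ≤ month ∧ month ≤ 12 ∧ 1900 ≤ year ∧ year ≤ 2024)
             | _, _, _ => false)
          else false) = false := by
        split_ifs with hx1 hx2
        · rfl
        · exfalso
          apply hB
          simp only [Bool.or_eq_false_iff, Bool.not_eq_true] at hx1
          simp only [bne_eq_false_iff_eq] at hx1
          simp only [List.all_cons, List.all_nil, Bool.and_eq_true, Bool.and_true] at hx2
          exact ⟨hx1.1.1, hx1.1.2, hx1.2, hx2.1, hx2.2.1, hx2.2.2⟩
        · rfl
      rw [hRHS]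
      rcases hAfalse with h | h
      · rw [if_neg (by simp [h])]
      · split_ifs with g1 g2
        · rw [h] at g2; exact absurd g2 (by simp)
        · rfl
        · rfl
  · rw [aCore_not3 cs (d :: m :: y :: w :: ws) (by rw [hsd, hsplit])
          (by intro _ _ _ h'; simp at h'),
        altCore_not3 cs (d :: m :: y :: w :: ws) (by rw [hsd, hsplit])
          (by intro _ _ _ h'; simp at h')]

-- ===== VERDICT (by name: the statement is the Claim_ definition above) =====
theorem checkDOB_spec : Claim_equal_checkDOB := by
  intro s _
  unfold Spec_checkDOB checkDOB checkDOB_alt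
  exact core_eq s.toList
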